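-- pv_equiv track=rewrite | github.com/aashishsatya/SearchGlass | IndexScript.py | splitStringList
-- ===== SOURCE A (Python) =====
-- def splitStringList(source, delimiters = ' \\~!@#$%^&*()_+=-{}[]:";<>?,./*-'):
--
--     """
--     Function that splits the source into a list of words based on the
--     delimiters given in splitlist.
--     Input: 'source', a LIST of words and 'delimiters', a STRING of
--     delimiters upon which the source is to be split.
--     Output: A list of words in HTML separated by the delimiters given.
--     Note: It is better to have use remove_tags() and refine this
--     source before this function is called.
--     """
--
--     if len(delimiters) == 0:
--         return source
--
--     # split source based on first delimiter
--     totalList = source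
--
--     for delimiter in delimiters:
--         # list to store new elements obtained from
--         # splitting each word in totalList by every
--         # delimiter
--         tempList = []
--         for word in totalList:
--             # split the word based on the current delimiter
--             testWords = word.split(delimiter)
--             tempList += testWords
--         totalList = tempList[:]
--
--     # checking for empty strings:
--     while '' in totalList:
--         totalList.remove('')
--
--     # checking for duplicates
--     tempList = totalList[:]
--     totalList = []
--     for word in tempList:
--         if word not in totalList:
--             totalList.append(word)
--
--     return totalList
-- ===== SOURCE B (Python) =====
-- def splitStringList(source, delimiters = ' \\~!@#$%^&*()_+=-{}[]:";<>?,./*-'):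
--     """Single-pass re-implementation: tokenize each word on the delimiter-char
--     set, dropping empty tokens, and dedup with a seen-set in first-occurrence
--     order. One pass over the characters instead of one full pass per delimiter."""
--     if len(delimiters) == 0:
--         return source
--     dset = set(delimiters)
--     out = []
--     seen = set()
--     for word in source:
--         for tok in _tokens(word, dset):
--             if tok not in seen:
--                 seen.add(tok)
--                 out.append(tok)
--     return out
--
-- def _tokens(word, dset):
--     toks = []
--     buf = []
--     for ch in word:
--         if ch in dset:
--             if buf:
--                 toks.append(''.join(buf))
--                 buf = []
--         else:
--             buf.append(ch)
--     if buf: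
--         toks.append(''.join(buf))
--     return toks
-- ===== Notes on version B (the rewrite author's own statement) =====
-- stated objective: faster
-- what changed: A makes one full pass over the whole word list per delimiter character (31 passes for the default), then removes empty strings with a quadratic while-remove loop and dedups with a quadratic list-membership scan; B tokenizes each word in a single character scan against a delimiter set and dedups on the fly with a seen-set, one pass over the input characters in total.
import Mathlib
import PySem

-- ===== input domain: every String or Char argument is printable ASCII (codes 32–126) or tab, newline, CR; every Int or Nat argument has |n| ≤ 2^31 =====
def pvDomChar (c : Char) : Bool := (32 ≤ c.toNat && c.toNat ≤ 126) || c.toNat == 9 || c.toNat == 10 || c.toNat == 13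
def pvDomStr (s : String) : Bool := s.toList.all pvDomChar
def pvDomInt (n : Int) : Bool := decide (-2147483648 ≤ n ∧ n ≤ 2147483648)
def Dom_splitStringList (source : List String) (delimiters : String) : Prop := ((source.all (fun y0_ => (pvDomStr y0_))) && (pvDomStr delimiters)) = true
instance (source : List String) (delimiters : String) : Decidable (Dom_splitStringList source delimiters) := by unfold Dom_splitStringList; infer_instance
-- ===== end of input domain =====

-- B replaces A's one-full-pass-per-delimiter splitting plus quadratic empty-removal and
-- quadratic list-membership dedup by a single character scan per word with a seen-set.

-- ===== PORT A =====
-- termination helper for the 'while "" in totalList: totalList.remove("")' loop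
theorem pvRemove?_length {α : Type} [BEq α] [LawfulBEq α] (xs xs' : List α) (v : α)
    (h : PySem.List.remove? xs v = some xs') : xs'.length < xs.length := by
  have hv : v ∈ xs := by
    by_contra hv
    rw [(PySem.List.remove?_eq_none_iff xs v).mpr hv] at h
    cases h
  rw [PySem.List.remove?_eq_some_erase xs v hv] at h
  injection h with h
  subst h
  have := List.length_erase_of_mem hv
  have : 1 ≤ xs.length := List.length_pos_of_mem hv
  omega

def pvRemoveEmpties (L : List String) : List String :=
  match h : PySem.List.remove? L "" with
  | none => L
  | some L' => pvRemoveEmpties L'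
termination_by L.length
decreasing_by exact pvRemove?_length L L' "" h

def splitStringList (source : List String) (delimiters : String) : List String :=
  if PySem.Str.len delimiters = 0 then source
  else
    (pvRemoveEmpties
      (delimiters.toList.foldl
        (fun totalList delim =>
          totalList.foldl (fun tempList word =>
            tempList ++ (PySem.Chars.splitOn word.toList [delim]).map String.ofList) []) source)).foldl
      (fun acc word => if word ∈ acc then acc else acc ++ [word]) []

-- ===== PORT B =====
def pvTokens (dset : PySem.Set Char) (buf : List Char) : List Char → List (List Char)
  | [] => if buf = [] then [] else [buf]
  | c :: cs =>
    if dset.contains c then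
      (if buf = [] then [] else [buf]) ++ pvTokens dset [] cs
    else pvTokens dset (buf ++ [c]) cs

def splitStringList_alt (source : List String) (delimiters : String) : List String :=
  if PySem.Str.len delimiters = 0 then source
  else
    PySem.Set.ofList
      (source.flatMap (fun word =>
        (pvTokens (PySem.Set.ofList delimiters.toList) [] word.toList).map String.ofList))

-- ===== PRECONDITION & SPEC =====
def Spec_splitStringList (source : List String) (delimiters : String) (out : List String) : Prop := out = splitStringList_alt source delimiters
instance (source : List String) (delimiters : String) (out : List String) : Decidable (Spec_splitStringList source delimiters out) := by unfold Spec_splitStringList; infer_instance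

-- ===== CLAIM (what is proved, stated in full; the proofs are below) =====
def Claim_equal_splitStringList : Prop := ∀ (source : List String) (delimiters : String), Dom_splitStringList source delimiters → Spec_splitStringList source delimiters (splitStringList source delimiters)

-- ===== LEMMAS AND PROOFS =====

-- splitting a char list at every occurrence of the single character d (spec of str.split(d))
def pvSp (d : Char) : List Char → List (List Char)
  | [] => [[]]
  | c :: cs =>
    if c = d then [] :: pvSp d cs
    else
      match pvSp d cs with
      | [] => [[c]]
      | h :: t => (c :: h) :: t

theorem pvSp_ne_nil (d : Char) (l : List Char) : pvSp d l ≠ [] := by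
  cases l with
  | nil => simp [pvSp]
  | cons c cs =>
    simp only [pvSp]
    split
    · simp
    · split <;> simp

theorem pvGo_nil (d : Char) (f : Nat) (cur : List Char) (acc : List (List Char)) :
    PySem.Chars.splitOn.go [d] (f+1) [] cur acc = (cur.reverse :: acc).reverse := by
  simp [PySem.Chars.splitOn.go]

theorem pvGo_cons (d c : Char) (f : Nat) (rest cur : List Char) (acc : List (List Char)) :
    PySem.Chars.splitOn.go [d] (f+1) (c :: rest) cur acc =
      if c = d then PySem.Chars.splitOn.go [d] f rest [] (cur.reverse :: acc)
      else PySem.Chars.splitOn.go [d] f rest (c :: cur) acc := by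
  by_cases h : c = d
  · subst h; simp [PySem.Chars.splitOn.go, List.isPrefixOf]
  · simp [PySem.Chars.splitOn.go, List.isPrefixOf, h, Ne.symm h]

theorem pvGo_single (d : Char) (fuel : Nat) :
    ∀ (l cur : List Char) (acc : List (List Char)), l.length < fuel →
    PySem.Chars.splitOn.go [d] fuel l cur acc =
      acc.reverse ++ (pvSp d l).modifyHead (fun x => cur.reverse ++ x) := by
  induction fuel with
  | zero => intro l cur acc h; omega
  | succ f ih =>
    intro l cur acc h
    cases l with
    | nil => simp [pvGo_nil, pvSp]
    | cons c cs =>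
      rw [pvGo_cons]
      obtain ⟨p, ps, hps⟩ : ∃ p ps, pvSp d cs = p :: ps := by
        cases hh : pvSp d cs with
        | nil => exact absurd hh (pvSp_ne_nil d cs)
        | cons p ps => exact ⟨p, ps, rfl⟩
      have hlen : cs.length < f := by simp at h; omega
      by_cases hc : c = d
      · rw [if_pos hc, ih cs [] _ hlen]
        simp [pvSp, hc, hps]
      · rw [if_neg hc, ih cs (c :: cur) _ hlen]
        simp [pvSp, hc, hps]

theorem pvSplitOn_single (d : Char) (l : List Char) :
    PySem.Chars.splitOn l [d] = pvSp d l := by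
  show PySem.Chars.splitOn.go [d] (l.length + 1) l [] [] = pvSp d l
  rw [pvGo_single d (l.length + 1) l [] [] (by omega)]
  obtain ⟨p, ps, hps⟩ : ∃ p ps, pvSp d l = p :: ps := by
    cases hh : pvSp d l with
    | nil => exact absurd hh (pvSp_ne_nil d l)
    | cons p ps => exact ⟨p, ps, rfl⟩
  simp [hps]

-- pvTokens with plain list membership for the delimiter set
def pvToksL (ds : List Char) (buf : List Char) : List Char → List (List Char)
  | [] => if buf = [] then [] else [buf]
  | c :: cs =>
    if c ∈ ds then (if buf = [] then [] else [buf]) ++ pvToksL ds [] cs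
    else pvToksL ds (buf ++ [c]) cs

theorem pvTokens_eq_toksL (ds : List Char) (l : List Char) : ∀ buf,
    pvTokens (PySem.Set.ofList ds) buf l = pvToksL ds buf l := by
  induction l with
  | nil => intro buf; simp [pvTokens, pvToksL]
  | cons c cs ih =>
    intro buf
    by_cases h : c ∈ ds
    · simp [pvTokens, pvToksL, h, ih]
    · simp [pvTokens, pvToksL, h, ih]

theorem pvToksL_nil_delims (l : List Char) : ∀ buf,
    pvToksL [] buf l = if buf ++ l = [] then [] else [buf ++ l] := by
  induction l with
  | nil => intro buf; simp [pvToksL]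
  | cons c cs ih =>
    intro buf
    simp only [pvToksL, List.not_mem_nil, if_false]
    rw [ih (buf ++ [c])]
    simp

theorem pvToksL_cons_delim (d : Char) (ds : List Char) (l : List Char) :
    ∀ (buf p : List Char) (ps : List (List Char)), pvSp d l = p :: ps →
    pvToksL (d :: ds) buf l = pvToksL ds buf p ++ ps.flatMap (fun q => pvToksL ds [] q) := by
  induction l with
  | nil =>
    intro buf p ps hsp
    simp only [pvSp] at hsp
    injection hsp with h1 h2
    subst h1; subst h2
    simp [pvToksL]
  | cons c cs ih =>
    intro buf p ps hsp
    obtain ⟨q, qs, hq⟩ : ∃ q qs, pvSp d cs = q :: qs := by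
      cases hh : pvSp d cs with
      | nil => exact absurd hh (pvSp_ne_nil d cs)
      | cons q qs => exact ⟨q, qs, rfl⟩
    by_cases hc : c = d
    · rw [pvSp] at hsp
      rw [if_pos hc] at hsp
      injection hsp with h1 h2
      subst h1; subst h2
      have := ih [] q qs hq
      simp only [pvToksL, hc, List.mem_cons, true_or, if_true, this, hq]
      rw [List.flatMap_cons]
    · rw [pvSp] at hsp
      rw [if_neg hc, hq] at hsp
      injection hsp with h1 h2
      subst h1; subst h2
      by_cases hcds : c ∈ ds
      · have := ih [] q qs hq
        simp only [pvToksL, List.mem_cons, hc, hcds, or_true, if_true, this]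
        rw [List.append_assoc]
      · have hnotin : c ∉ d :: ds := by simp [hc, hcds]
        have := ih (buf ++ [c]) q qs hq
        simp only [pvToksL, hnotin, if_false, hcds, this]

-- the main splitting invariant: A's repeated full-pass splitting, with empties removed,
-- is per-word tokenisation on the delimiter set
theorem pvMain (ds : List Char) : ∀ (L : List String),
    (ds.foldl (fun tl d =>
        tl.foldl (fun tempList word =>
          tempList ++ (PySem.Chars.splitOn word.toList [d]).map String.ofList) []) L).filter
      (fun w => decide (w ≠ "")) =
    L.flatMap (fun w => (pvToksL ds [] w.toList).map String.ofList) := by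
  induction ds with
  | nil =>
    intro L
    induction L with
    | nil => simp
    | cons w ws ihL =>
      simp only [List.foldl_nil] at ihL ⊢
      rw [List.filter_cons, List.flatMap_cons, ← ihL]
      by_cases hw : w = ""
      · subst hw; simp [pvToksL_nil_delims]
      · have htl : w.toList ≠ [] := by
          intro hh
          exact hw (by rw [← (String.ofList_toList : String.ofList w.toList = w), hh])
        simp [pvToksL_nil_delims, hw, htl]
  | cons d ds ih =>
    intro L
    simp only [List.foldl_cons]
    rw [PySem.List.foldl_append_eq_flatMap (fun word => (PySem.Chars.splitOn word.toList [d]).map String.ofList) L []]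
    rw [ih]
    simp only [List.nil_append]
    rw [List.flatMap_assoc]
    have hfun : ∀ w : String,
        ((PySem.Chars.splitOn w.toList [d]).map String.ofList).flatMap
            (fun w2 => (pvToksL ds [] w2.toList).map String.ofList)
          = (pvToksL (d :: ds) [] w.toList).map String.ofList := by
      intro w
      rw [List.flatMap_map, pvSplitOn_single]
      obtain ⟨p, ps, hps⟩ : ∃ p ps, pvSp d w.toList = p :: ps := by
        cases hh : pvSp d w.toList with
        | nil => exact absurd hh (pvSp_ne_nil d w.toList)
        | cons p ps => exact ⟨p, ps, rfl⟩
      rw [hps, pvToksL_cons_delim d ds w.toList [] p ps hps, List.map_append, List.map_flatMap]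
      simp only [List.flatMap_cons, String.toList_ofList]
    simp only [hfun]

theorem pvFilter_erase (v : String) : ∀ (L : List String),
    (L.erase v).filter (fun w => decide (w ≠ v)) = L.filter (fun w => decide (w ≠ v)) := by
  intro L
  induction L with
  | nil => simp
  | cons a L ih =>
    by_cases h : a = v
    · subst h; simp [List.erase_cons_head]
    · rw [List.erase_cons_tail (by simp [h])]
      simp only [List.filter_cons]
      simp [h]
      simpa using ih

theorem pvRemoveEmpties_filter (L : List String) :
    pvRemoveEmpties L = L.filter (fun w => decide (w ≠ "")) := by
  fun_induction pvRemoveEmpties L with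
  | case1 L h =>
    rw [PySem.List.remove?_eq_none_iff] at h
    rw [List.filter_eq_self.mpr]
    intro a ha
    simp
    intro hh
    exact h (hh ▸ ha)
  | case2 L L' h ih =>
    have hv : "" ∈ L := by
      by_contra hv
      rw [(PySem.List.remove?_eq_none_iff L "").mpr hv] at h
      cases h
    rw [PySem.List.remove?_eq_some_erase L "" hv] at h
    injection h with h
    subst h
    rw [ih, pvFilter_erase]

theorem pvDedup_foldl : ∀ (L acc : List String),
    L.foldl (fun acc w => if w ∈ acc then acc else acc ++ [w]) acc =
    L.foldl PySem.Set.add acc := by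
  intro L
  induction L with
  | nil => intro acc; rfl
  | cons w ws ih =>
    intro acc
    simp only [List.foldl_cons]
    rw [ih]
    congr 1
    by_cases h : w ∈ acc <;> simp [PySem.Set.add, h]

-- ===== VERDICT (by name: the statement is the Claim_ definition above) =====
theorem splitStringList_spec : Claim_equal_splitStringList := by
  intro source delimiters _dom
  unfold Spec_splitStringList splitStringList splitStringList_alt
  by_cases hd : PySem.Str.len delimiters = 0
  · rw [if_pos hd, if_pos hd]
  · rw [if_neg hd, if_neg hd]
    rw [pvDedup_foldl, ← PySem.Set.ofList_eq_foldl, pvRemoveEmpties_filter, pvMain]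
    have hfun : (fun w : String => (pvToksL delimiters.toList [] w.toList).map String.ofList)
        = (fun word : String =>
            (pvTokens (PySem.Set.ofList delimiters.toList) [] word.toList).map String.ofList) :=
      funext fun w => by rw [pvTokens_eq_toksL]
    rw [hfun]
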